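-- pv_equiv track=rewrite | github.com/dkuulis/aoc | 2025/d04.py | removable
-- ===== SOURCE A (Python) =====
-- def neighbours(x, y, size):
--     for dx in [-1, 0, 1]:
--         nx = x + dx
--         if nx >= 0 and nx < size:
--             for dy in [-1, 0, 1]:
--                 if dx == 0 and dy == 0:
--                     continue
--                 ny = y + dy
--                 if ny >= 0 and ny < size:
--                     yield (nx, ny)
--
-- def check(map, x, y, size):
--     if map[y][x] > 0:
--         n = sum(map[ny][nx] for nx, ny in neighbours(x, y, size))
--         if n < 4:
--             yield x, y
--
-- def accessible(map):
--     result = set()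
--
--     size = len(map)
--     for y in range(size):
--         for x in range(size):
--             result.update(check(map, x, y, size))
--
--     return result
--
-- def removable(map):
--
--     result = 0
--     size = len(map)
--
--     remove = accessible(map)
--
--     while True:
--         result += len(remove)
--
--         if len(remove) == 0:
--             break
--
--         next = set()
--         for x, y in remove:
--             map[y][x] = 0
--             next.update(neighbours(x, y, size))
--
--         remove = set()
--         for x, y in next:
--             remove.update(check(map, x, y, size))
--     # end while
--
--     return result
-- ===== SOURCE B (Python) =====
-- # Full-rescan fixpoint: each round rescan the whole grid for removable cells,
-- # count them, zero them, repeat until none; mutates `map` like the original.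
-- OFFSETS = [(-1, -1), (-1, 0), (-1, 1), (0, -1), (0, 1), (1, -1), (1, 0), (1, 1)]
--
-- def removable(map):
--     size = len(map)
--     total = 0
--     while True:
--         rem = {(x, y)
--                for y in range(size) for x in range(size)
--                if map[y][x] > 0
--                and sum(map[y + dy][x + dx]
--                        for dx, dy in OFFSETS
--                        if 0 <= x + dx < size and 0 <= y + dy < size) < 4}
--         total += len(rem)
--         if not rem:
--             return total
--         for x, y in rem:
--             map[y][x] = 0
-- ===== Notes on version B (the rewrite author's own statement) =====
-- stated objective: simpler
-- what changed: B drops A's incremental frontier bookkeeping (accessible/next sets seeded from neighbours of just-removed cells) and instead recomputes the full removable set by rescanning the whole grid each round, as one set comprehension over an 8-offset table.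
import Mathlib
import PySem

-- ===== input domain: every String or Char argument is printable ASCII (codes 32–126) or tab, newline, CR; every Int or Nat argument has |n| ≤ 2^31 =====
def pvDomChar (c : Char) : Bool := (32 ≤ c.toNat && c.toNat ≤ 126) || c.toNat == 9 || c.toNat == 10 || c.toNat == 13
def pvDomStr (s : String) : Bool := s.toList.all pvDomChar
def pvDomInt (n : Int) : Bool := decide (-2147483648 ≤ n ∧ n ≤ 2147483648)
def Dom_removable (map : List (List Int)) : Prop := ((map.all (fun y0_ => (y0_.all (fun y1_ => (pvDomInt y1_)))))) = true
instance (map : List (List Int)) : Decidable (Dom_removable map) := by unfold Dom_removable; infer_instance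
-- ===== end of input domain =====

-- B replaces A's incremental frontier sets by a full-grid rescan each round (simpler, not faster);
-- both Pythons zero the same cells of the caller's `map` in place — the theorems are about the return value.


-- ===== PORT A =====
-- map[y][x], total form (default 0): exact under Pre_ (all indices used lie in [0, size) and rows are long enough)
def cell (m : List (List Int)) (x y : Int) : Int := (m.getD y.toNat []).getD x.toNat 0
-- map[y][x] = 0
def setCell (m : List (List Int)) (x y : Int) : List (List Int) :=
  m.set y.toNat ((m.getD y.toNat []).set x.toNat 0)

def neighbours (x y size : Int) : List (Int × Int) :=
  [(-1 : Int), 0, 1].flatMap (fun dx =>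
    let nx := x + dx
    if 0 ≤ nx ∧ nx < size then
      [(-1 : Int), 0, 1].flatMap (fun dy =>
        if dx = 0 ∧ dy = 0 then []
        else
          let ny := y + dy
          if 0 ≤ ny ∧ ny < size then [(nx, ny)] else [])
    else [])

def checkA (m : List (List Int)) (x y size : Int) : List (Int × Int) :=
  if cell m x y > 0 then
    if ((neighbours x y size).map (fun c => cell m c.1 c.2)).sum < 4 then [(x, y)] else []
  else []

def accessible (m : List (List Int)) : PySem.Set (Int × Int) :=
  (PySem.List.pyRange 0 m.length 1).foldl (fun r y =>
    (PySem.List.pyRange 0 m.length 1).foldl (fun r x =>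
      PySem.Set.update r (checkA m x y m.length)) r) PySem.Set.empty

-- `while True:` as fuel recursion; size*size+2 rounds always suffice (each non-final round zeroes ≥ 1 positive cell)
def loopA (size : Int) : Nat → List (List Int) → PySem.Set (Int × Int) → Int → Int
  | 0, _, _, result => result
  | fuel + 1, m, remove, result =>
    let result := result + (remove.length : Int)
    if remove.length = 0 then result
    else
      let step := remove.foldl
        (fun (p : List (List Int) × PySem.Set (Int × Int)) c =>
          (setCell p.1 c.1 c.2, PySem.Set.update p.2 (neighbours c.1 c.2 size)))
        (m, PySem.Set.empty)
      let remove' := step.2.foldl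
        (fun r c => PySem.Set.update r (checkA step.1 c.1 c.2 size)) PySem.Set.empty
      loopA size fuel step.1 remove' result

def removable (map : List (List Int)) : Int :=
  loopA map.length (map.length * map.length + 2) map (accessible map) 0

-- ===== PORT B =====
def OFFSETS : List (Int × Int) :=
  [(-1, -1), (-1, 0), (-1, 1), (0, -1), (0, 1), (1, -1), (1, 0), (1, 1)]

def nsumB (m : List (List Int)) (x y size : Int) : Int :=
  (OFFSETS.flatMap (fun d =>
    if (0 ≤ x + d.1 ∧ x + d.1 < size) ∧ (0 ≤ y + d.2 ∧ y + d.2 < size) then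
      [cell m (x + d.1) (y + d.2)] else [])).sum

-- the set comprehension: its elements (x, y) are pairwise distinct, so the list is the set
def scanB (m : List (List Int)) (size : Int) : List (Int × Int) :=
  (PySem.List.pyRange 0 size 1).flatMap (fun y =>
    (PySem.List.pyRange 0 size 1).flatMap (fun x =>
      if cell m x y > 0 ∧ nsumB m x y size < 4 then [(x, y)] else []))

def loopB (size : Int) : Nat → List (List Int) → Int → Int
  | 0, _, total => total
  | fuel + 1, m, total =>
    let rem := scanB m size
    let total := total + (rem.length : Int)
    if rem.length = 0 then total
    else loopB size fuel (rem.foldl (fun m c => setCell m c.1 c.2) m) total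

def removable_alt (map : List (List Int)) : Int :=
  loopB map.length (map.length * map.length + 2) map 0

-- ===== PRECONDITION & SPEC =====
-- Pre_ excludes exactly the inputs where the Python A raises IndexError: a row shorter than len(map)
-- (accessible reads map[y][x] for every x < len(map)); A returns normally on every other input.
def Pre_removable (map : List (List Int)) : Prop := ∀ row ∈ map, map.length ≤ row.length
instance (map : List (List Int)) : Decidable (Pre_removable map) := by unfold Pre_removable; infer_instance
def pvWitness_removable : List (List Int) := [[1, 2], [3, 4]]

def Spec_removable (map : List (List Int)) (out : Int) : Prop := out = removable_alt map
instance (map : List (List Int)) (out : Int) : Decidable (Spec_removable map out) := by unfold Spec_removable; infer_instance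

-- ===== CLAIM (what is proved, stated in full; the proofs are below) =====
def Claim_equal_removable : Prop := ∀ (map : List (List Int)), Dom_removable map → Pre_removable map → Spec_removable map (removable map)

-- ===== LEMMAS AND PROOFS =====

-- B-shaped neighbour list: the common form both ports' neighbourhoods reduce to
def neighB (x y size : Int) : List (Int × Int) :=
  OFFSETS.flatMap (fun d =>
    if (0 ≤ x + d.1 ∧ x + d.1 < size) ∧ (0 ≤ y + d.2 ∧ y + d.2 < size) then
      [(x + d.1, y + d.2)] else [])

-- the removability predicate shared (after rewriting) by checkA and scanB
def predB (m : List (List Int)) (x y size : Int) : Prop :=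
  cell m x y > 0 ∧ nsumB m x y size < 4

-- zeroing every cell of a list: A's and B's common mutation step
def zeroAll (m : List (List Int)) (L : List (Int × Int)) : List (List Int) :=
  L.foldl (fun m c => setCell m c.1 c.2) m

-- cell (x, y) names a real entry of m
def validC (m : List (List Int)) (c : Int × Int) : Prop :=
  c.2.toNat < m.length ∧ c.1.toNat < (m.getD c.2.toNat []).length

set_option maxHeartbeats 1000000 in
theorem neighbours_eq (x y size : Int) : neighbours x y size = neighB x y size := by
  simp only [neighbours, neighB, OFFSETS, List.flatMap_cons, List.flatMap_nil,
    List.append_nil]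
  norm_num only
  by_cases h1 : 1 ≤ x ∧ x ≤ size <;>
    by_cases h2 : 0 ≤ x ∧ x < size <;>
      by_cases h3 : 0 ≤ x + 1 ∧ x + 1 < size <;>
        simp [h1, h2, h3]

theorem mem_neighB {c : Int × Int} {x y size : Int} :
    c ∈ neighB x y size ↔
      c ≠ (x, y) ∧ x - 1 ≤ c.1 ∧ c.1 ≤ x + 1 ∧ y - 1 ≤ c.2 ∧ c.2 ≤ y + 1 ∧
        0 ≤ c.1 ∧ c.1 < size ∧ 0 ≤ c.2 ∧ c.2 < size := by
  obtain ⟨a, b⟩ := c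
  constructor
  · intro h
    simp only [neighB, List.mem_flatMap] at h
    obtain ⟨d, hd, h⟩ := h
    fin_cases hd <;> first | (simp_all [Prod.ext_iff]; omega) | simp_all [Prod.ext_iff]
  · rintro ⟨hne, h1, h2, h3, h4, h5, h6, h7, h8⟩
    have hne' : ¬(a = x ∧ b = y) := by simpa [Prod.ext_iff] using hne
    simp only [neighB, List.mem_flatMap]
    refine ⟨(a - x, b - y), ?_, ?_⟩
    · have hax : a - x = -1 ∨ a - x = 0 ∨ a - x = 1 := by omega
      have hby : b - y = -1 ∨ b - y = 0 ∨ b - y = 1 := by omega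
      rcases hax with h'|h'|h' <;> rcases hby with h''|h''|h'' <;>
        first
          | (simp [OFFSETS, Prod.ext_iff, h', h'']; omega)
          | simp [OFFSETS, Prod.ext_iff, h', h'']
    · rw [show x + (a - x, b - y).1 = a by ring, show y + (a - x, b - y).2 = b by ring,
        if_pos ⟨⟨h5, h6⟩, ⟨h7, h8⟩⟩]
      simp

theorem neighB_symm {c : Int × Int} {x y size : Int} (hc : c ∈ neighB x y size)
    (hx : 0 ≤ x ∧ x < size) (hy : 0 ≤ y ∧ y < size) : (x, y) ∈ neighB c.1 c.2 size := by
  rw [mem_neighB] at hc ⊢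
  obtain ⟨hne, h⟩ := hc
  refine ⟨?_, by omega⟩
  simp [Prod.ext_iff] at hne ⊢
  omega

theorem nsumB_eq (m : List (List Int)) (x y size : Int) :
    nsumB m x y size = ((neighB x y size).map (fun c => cell m c.1 c.2)).sum := by
  simp [nsumB, neighB, List.map_flatMap, apply_ite]

theorem mem_checkA {d : Int × Int} {m : List (List Int)} {x y size : Int} :
    d ∈ checkA m x y size ↔ d = (x, y) ∧ predB m x y size := by
  unfold checkA predB
  rw [neighbours_eq, ← nsumB_eq]
  split_ifs <;> simp_all

theorem mem_scanB {d : Int × Int} {m : List (List Int)} {size : Int} :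
    d ∈ scanB m size ↔
      (0 ≤ d.1 ∧ d.1 < size ∧ 0 ≤ d.2 ∧ d.2 < size) ∧ predB m d.1 d.2 size := by
  obtain ⟨a, b⟩ := d
  simp only [scanB, List.mem_flatMap, PySem.List.mem_pyRange_one, predB]
  constructor
  · rintro ⟨yy, hy, xx, hx, hd⟩
    split at hd <;> simp_all
  · rintro ⟨⟨ha1, ha2, hb1, hb2⟩, hp⟩
    exact ⟨b, ⟨hb1, hb2⟩, a, ⟨ha1, ha2⟩, by simp [hp]⟩

theorem mem_if_singleton {a b : Int × Int} {p : Prop} [Decidable p]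
    (h : a ∈ if p then [b] else ([] : List (Int × Int))) : a = b := by
  split at h <;> simp_all

theorem nodup_scanB (m : List (List Int)) (size : Int) : (scanB m size).Nodup := by
  unfold scanB
  rw [List.nodup_flatMap]
  constructor
  · intro y _
    rw [List.nodup_flatMap]
    refine ⟨fun x _ => by split <;> simp, ?_⟩
    refine (PySem.List.pairwise_lt_pyRange_one 0 size).imp ?_
    intro x x' hlt a ha ha'
    have h1 := mem_if_singleton ha
    have h2 := mem_if_singleton ha'
    subst h1
    simp [Prod.ext_iff] at h2
    omega
  · refine (PySem.List.pairwise_lt_pyRange_one 0 size).imp ?_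
    intro y y' hlt a ha ha'
    simp only [List.mem_flatMap] at ha ha'
    obtain ⟨x, _, ha⟩ := ha
    obtain ⟨x', _, ha'⟩ := ha'
    have h1 := mem_if_singleton ha
    have h2 := mem_if_singleton ha'
    subst h1
    simp [Prod.ext_iff] at h2
    omega

theorem validC_of_pos {m : List (List Int)} {c : Int × Int} (h : 0 < cell m c.1 c.2) :
    validC m c := by
  unfold cell at h
  unfold validC
  by_cases h2 : c.2.toNat < m.length
  · refine ⟨h2, ?_⟩
    by_cases h1 : c.1.toNat < (m.getD c.2.toNat []).length
    · exact h1
    · have hz : (m.getD c.2.toNat []).getD c.1.toNat 0 = 0 :=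
        List.getD_eq_default _ _ (by omega)
      omega
  · have hrow : m.getD c.2.toNat [] = [] := List.getD_eq_default _ _ (by omega)
    rw [hrow] at h
    simp at h

theorem rowlen_setCell (m : List (List Int)) (x y : Int) (j : Nat) :
    ((setCell m x y).getD j []).length = (m.getD j []).length := by
  simp only [setCell, List.getD_eq_getElem?_getD, List.getElem?_set]
  split_ifs with h1 h2
  · subst h1
    rw [List.getElem?_eq_getElem h2]
    simp
  · subst h1
    rw [List.getElem?_eq_none (by omega)]
  · rfl

theorem cell_setCell {m : List (List Int)} {x y : Int} (a b : Int)
    (hx : 0 ≤ x) (hy : 0 ≤ y) (ha : 0 ≤ a) (hb : 0 ≤ b) (hv : validC m (x, y)) :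
    cell (setCell m x y) a b = if a = x ∧ b = y then 0 else cell m a b := by
  obtain ⟨hvy, hvx⟩ := hv
  simp only at hvy hvx
  rw [List.getD_eq_getElem?_getD] at hvx
  simp only [cell, setCell, List.getD_eq_getElem?_getD, List.getElem?_set]
  by_cases hby : y.toNat = b.toNat
  · rw [if_pos hby, if_pos (by omega)]
    simp only [Option.getD_some]
    rw [← hby, List.getElem?_set]
    by_cases hax : x.toNat = a.toNat
    · rw [if_pos hax, if_pos hvx, if_pos (by omega)]
      simp
    · rw [if_neg hax, if_neg (by omega)]
  · rw [if_neg hby, if_neg (by omega)]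

theorem length_zeroAll (m : List (List Int)) (L : List (Int × Int)) :
    (zeroAll m L).length = m.length := by
  induction L generalizing m with
  | nil => rfl
  | cons c L ih => simpa [zeroAll, setCell] using ih (setCell m c.1 c.2)

theorem rowlen_zeroAll (m : List (List Int)) (L : List (Int × Int)) (j : Nat) :
    ((zeroAll m L).getD j []).length = (m.getD j []).length := by
  induction L generalizing m with
  | nil => rfl
  | cons c L ih => rw [zeroAll, List.foldl_cons, ← zeroAll, ih, rowlen_setCell]

theorem validC_setCell {m : List (List Int)} {x y : Int} {c : Int × Int} (h : validC m c) :
    validC (setCell m x y) c := by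
  unfold validC at h ⊢
  rw [rowlen_setCell]
  simpa [setCell] using h

theorem cell_zeroAll {m : List (List Int)} {L : List (Int × Int)}
    (hL : ∀ c ∈ L, 0 ≤ c.1 ∧ 0 ≤ c.2 ∧ validC m c) (a b : Int) (ha : 0 ≤ a) (hb : 0 ≤ b) :
    cell (zeroAll m L) a b = if (a, b) ∈ L then 0 else cell m a b := by
  induction L generalizing m with
  | nil => simp [zeroAll]
  | cons c L ih =>
    obtain ⟨hc1, hc2, hcv⟩ := hL c (by simp)
    rw [zeroAll, List.foldl_cons, ← zeroAll,
      ih (fun d hd => ⟨(hL d (by simp [hd])).1, (hL d (by simp [hd])).2.1,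
        validC_setCell (hL d (by simp [hd])).2.2⟩),
      cell_setCell a b hc1 hc2 ha hb (by simpa [Prod.ext_iff] using hcv)]
    by_cases h1 : (a, b) ∈ L <;> by_cases h2 : a = c.1 ∧ b = c.2 <;>
      simp_all [Prod.ext_iff]

theorem cell_eq_getElem (m : List (List Int)) (i j : Nat) (hj : j < m.length)
    (hi : i < m[j].length) : cell m (↑i) (↑j) = m[j][i] := by
  unfold cell
  simp only [Int.toNat_natCast]
  rw [List.getD_eq_getElem _ _ hj, List.getD_eq_getElem _ _ hi]

theorem zeroAll_congr {m : List (List Int)} {L L' : List (Int × Int)}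
    (hL : ∀ c ∈ L, 0 ≤ c.1 ∧ 0 ≤ c.2 ∧ validC m c)
    (hL' : ∀ c ∈ L', 0 ≤ c.1 ∧ 0 ≤ c.2 ∧ validC m c)
    (hiff : ∀ c, c ∈ L ↔ c ∈ L') : zeroAll m L = zeroAll m L' := by
  apply List.ext_getElem (by rw [length_zeroAll, length_zeroAll])
  intro j h1 h2
  have hrl : ∀ K : List (Int × Int), ∀ h : j < (zeroAll m K).length,
      (zeroAll m K)[j].length = (m.getD j []).length := by
    intro K h
    rw [← List.getD_eq_getElem _ _ h, rowlen_zeroAll]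
  apply List.ext_getElem (by rw [hrl L h1, hrl L' h2])
  intro i hi1 hi2
  rw [← cell_eq_getElem _ _ _ h1 hi1, ← cell_eq_getElem _ _ _ h2 hi2,
    cell_zeroAll hL _ _ (by omega) (by omega), cell_zeroAll hL' _ _ (by omega) (by omega)]
  by_cases h : ((i : Int), (j : Int)) ∈ L
  · rw [if_pos h, if_pos ((hiff _).mp h)]
  · rw [if_neg h, if_neg (fun hc => h ((hiff _).mpr hc))]

theorem mem_foldl_update {α : Type} [BEq α] [LawfulBEq α] {β : Type}
    (g : β → List α) (L : List β) (s : PySem.Set α) (d : α) :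
    d ∈ L.foldl (fun r c => PySem.Set.update r (g c)) s ↔ d ∈ s ∨ ∃ c ∈ L, d ∈ g c := by
  induction L generalizing s with
  | nil => simp
  | cons c L ih =>
    rw [List.foldl_cons, ih, PySem.Set.mem_update]
    constructor
    · rintro ((h | h) | ⟨e, he, h⟩)
      · exact Or.inl h
      · exact Or.inr ⟨c, by simp, h⟩
      · exact Or.inr ⟨e, by simp [he], h⟩
    · rintro (h | ⟨e, he, h⟩)
      · exact Or.inl (Or.inl h)
      · rcases List.mem_cons.mp he with rfl | he
        · exact Or.inl (Or.inr h)
        · exact Or.inr ⟨e, he, h⟩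

theorem nodup_foldl_update {α : Type} [BEq α] [LawfulBEq α] {β : Type}
    (g : β → List α) (L : List β) (s : PySem.Set α) (hs : s.Nodup) :
    (L.foldl (fun r c => PySem.Set.update r (g c)) s).Nodup := by
  induction L generalizing s with
  | nil => exact hs
  | cons c L ih => exact ih _ (PySem.Set.nodup_update _ _ hs)

theorem mem_foldl_update2 {α : Type} [BEq α] [LawfulBEq α]
    (g : Int → Int → List α) (ys xs : List Int) (s : PySem.Set α) (d : α) :
    d ∈ ys.foldl (fun r y => xs.foldl (fun r x => PySem.Set.update r (g x y)) r) s ↔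
      d ∈ s ∨ ∃ y ∈ ys, ∃ x ∈ xs, d ∈ g x y := by
  induction ys generalizing s with
  | nil => simp
  | cons y ys ih =>
    rw [List.foldl_cons, ih, mem_foldl_update]
    constructor
    · rintro ((h | ⟨x, hx, h⟩) | ⟨y', hy', x, hx, h⟩)
      · exact Or.inl h
      · exact Or.inr ⟨y, by simp, x, hx, h⟩
      · exact Or.inr ⟨y', by simp [hy'], x, hx, h⟩
    · rintro (h | ⟨y', hy', x, hx, h⟩)
      · exact Or.inl (Or.inl h)
      · rcases List.mem_cons.mp hy' with rfl | hy'
        · exact Or.inl (Or.inr ⟨x, hx, h⟩)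
        · exact Or.inr ⟨y', hy', x, hx, h⟩

theorem nodup_foldl_update2 {α : Type} [BEq α] [LawfulBEq α]
    (g : Int → Int → List α) (ys xs : List Int) (s : PySem.Set α) (hs : s.Nodup) :
    (ys.foldl (fun r y => xs.foldl (fun r x => PySem.Set.update r (g x y)) r) s).Nodup := by
  induction ys generalizing s with
  | nil => exact hs
  | cons y ys ih => exact ih _ (nodup_foldl_update _ _ _ hs)

theorem mem_accessible {d : Int × Int} {m : List (List Int)} :
    d ∈ accessible m ↔
      ∃ y, (0 ≤ y ∧ y < (m.length : Int)) ∧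
        ∃ x, (0 ≤ x ∧ x < (m.length : Int)) ∧ d ∈ checkA m x y m.length := by
  unfold accessible
  rw [mem_foldl_update2 (fun x y => checkA m x y m.length)]
  simp [PySem.Set.empty, PySem.List.mem_pyRange_one]

theorem nodup_accessible (m : List (List Int)) : (accessible m).Nodup := by
  exact nodup_foldl_update2 (fun x y => checkA m x y m.length) _ _ _ List.nodup_nil

theorem accessible_iff_scan {d : Int × Int} {m : List (List Int)} :
    d ∈ accessible m ↔ d ∈ scanB m m.length := by
  rw [mem_accessible, mem_scanB]
  constructor
  · rintro ⟨y, hy, x, hx, hd⟩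
    obtain ⟨rfl, hp⟩ := mem_checkA.mp hd
    exact ⟨⟨hx.1, hx.2, hy.1, hy.2⟩, hp⟩
  · rintro ⟨⟨h1, h2, h3, h4⟩, hp⟩
    exact ⟨d.2, ⟨h3, h4⟩, d.1, ⟨h1, h2⟩, mem_checkA.mpr ⟨by simp, hp⟩⟩

theorem step_fst (size : Int) (m : List (List Int)) (s : PySem.Set (Int × Int))
    (R : List (Int × Int)) :
    R.foldl (fun (p : List (List Int) × PySem.Set (Int × Int)) c =>
        (setCell p.1 c.1 c.2, PySem.Set.update p.2 (neighbours c.1 c.2 size))) (m, s)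
      = (zeroAll m R, R.foldl (fun t c => PySem.Set.update t (neighbours c.1 c.2 size)) s) := by
  rw [PySem.List.foldl_prod_mk (f := fun m (c : Int × Int) => setCell m c.1 c.2)
    (g := fun t (c : Int × Int) => PySem.Set.update t (neighbours c.1 c.2 size))]
  rfl

theorem scan_after_zero {size : Int} {m : List (List Int)} {R : List (Int × Int)}
    (hiff : ∀ d, d ∈ R ↔ d ∈ scanB m size) (d : Int × Int) :
    (d ∈ (R.foldl (fun t c => PySem.Set.update t (neighbours c.1 c.2 size))
            (PySem.Set.empty : PySem.Set (Int × Int))).foldl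
        (fun r c => PySem.Set.update r (checkA (zeroAll m R) c.1 c.2 size)) PySem.Set.empty)
      ↔ d ∈ scanB (zeroAll m R) size := by
  have hR : ∀ c ∈ R, (0 ≤ c.1 ∧ c.1 < size ∧ 0 ≤ c.2 ∧ c.2 < size) ∧ predB m c.1 c.2 size :=
    fun c hc => mem_scanB.mp ((hiff c).mp hc)
  have hRv : ∀ c ∈ R, 0 ≤ c.1 ∧ 0 ≤ c.2 ∧ validC m c :=
    fun c hc => ⟨(hR c hc).1.1, (hR c hc).1.2.2.1, validC_of_pos (hR c hc).2.1⟩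
  rw [mem_foldl_update, mem_scanB]
  simp only [PySem.Set.empty, List.not_mem_nil, false_or]
  constructor
  · rintro ⟨c, hc, hd⟩
    obtain ⟨rfl, hp⟩ := mem_checkA.mp hd
    rw [mem_foldl_update] at hc
    simp only [List.not_mem_nil, false_or] at hc
    obtain ⟨e, _, hce⟩ := hc
    rw [neighbours_eq, mem_neighB] at hce
    exact ⟨⟨hce.2.2.2.2.2.1, hce.2.2.2.2.2.2.1, hce.2.2.2.2.2.2.2.1, hce.2.2.2.2.2.2.2.2⟩, hp⟩
  · rintro ⟨⟨h1, h2, h3, h4⟩, hp⟩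
    have hdR : d ∉ R := by
      intro hd
      have := cell_zeroAll hRv d.1 d.2 h1 h3
      rw [if_pos (by simpa using hd)] at this
      have hpos := hp.1
      rw [this] at hpos
      omega
    by_cases hadj : ∃ e ∈ R, e ∈ neighB d.1 d.2 size
    · obtain ⟨e, heR, he⟩ := hadj
      refine ⟨d, ?_, mem_checkA.mpr ⟨by simp, hp⟩⟩
      rw [mem_foldl_update]
      refine Or.inr ⟨e, heR, ?_⟩
      rw [neighbours_eq]
      simpa using neighB_symm he ⟨h1, h2⟩ ⟨h3, h4⟩
    · exfalso
      have hcell : cell (zeroAll m R) d.1 d.2 = cell m d.1 d.2 := by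
        rw [cell_zeroAll hRv d.1 d.2 h1 h3, if_neg (by simpa using hdR)]
      have hsum : nsumB (zeroAll m R) d.1 d.2 size = nsumB m d.1 d.2 size := by
        rw [nsumB_eq, nsumB_eq]
        congr 1
        apply List.map_congr_left
        intro c hc
        have hb := mem_neighB.mp hc
        rw [cell_zeroAll hRv c.1 c.2 hb.2.2.2.2.2.1 hb.2.2.2.2.2.2.2.1,
          if_neg (by simpa using fun hcR => hadj ⟨c, hcR, hc⟩)]
      have hpm : predB m d.1 d.2 size := by
        unfold predB at hp ⊢
        rw [hcell, hsum] at hp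
        exact hp
      exact hdR ((hiff d).mpr (mem_scanB.mpr ⟨⟨h1, h2, h3, h4⟩, hpm⟩))

theorem loop_eq (size : Int) (fuel : Nat) :
    ∀ (m : List (List Int)) (R : PySem.Set (Int × Int)) (res : Int), R.Nodup →
      (∀ d, d ∈ R ↔ d ∈ scanB m size) →
      loopA size fuel m R res = loopB size fuel m res := by
  induction fuel with
  | zero => intro m R res _ _; rfl
  | succ fuel ih =>
    intro m R res hnd hiff
    have hlen : R.length = (scanB m size).length :=
      (((List.perm_ext_iff_of_nodup hnd (nodup_scanB m size)).mpr hiff)).length_eq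
    have hRv : ∀ c ∈ R, 0 ≤ c.1 ∧ 0 ≤ c.2 ∧ validC m c := by
      intro c hc
      have h := mem_scanB.mp ((hiff c).mp hc)
      exact ⟨h.1.1, h.1.2.2.1, validC_of_pos h.2.1⟩
    have hSv : ∀ c ∈ scanB m size, 0 ≤ c.1 ∧ 0 ≤ c.2 ∧ validC m c := by
      intro c hc
      have h := mem_scanB.mp hc
      exact ⟨h.1.1, h.1.2.2.1, validC_of_pos h.2.1⟩
    simp only [loopA, loopB, step_fst]
    rw [hlen]
    by_cases hz : (scanB m size).length = 0
    · rw [if_pos hz, if_pos hz]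
    · rw [if_neg hz, if_neg hz]
      have hmap : (scanB m size).foldl (fun m c => setCell m c.1 c.2) m = zeroAll m R := by
        rw [← zeroAll]
        exact zeroAll_congr hSv hRv (fun c => (hiff c).symm)
      rw [hmap]
      exact ih (zeroAll m R) _ _
        (nodup_foldl_update _ _ _ List.nodup_nil)
        (scan_after_zero hiff)

-- ===== VERDICT (by name: the statement is the Claim_ definition above) =====
theorem removable_spec : Claim_equal_removable := by
  intro m _ _
  unfold Spec_removable removable removable_alt
  exact loop_eq m.length _ m (accessible m) 0 (nodup_accessible m)
    (fun d => accessible_iff_scan)
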